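-- pv_equiv track=rewrite | github.com/taechanha/PS | 예술성.py | get_adj_num_groups
-- ===== SOURCE A (Python) =====
-- def get_adj_num_groups(gi, gj):
--     adj_pos = set()
--     for r, c in gi:
--         for dr, dc in [(0, 1), (0, -1), (-1, 0), (1, 0)]:
--             nr, nc = r + dr, c + dc
--             if (nr, nc) in gj:
--                 adj_pos.add((r, c, nr, nc))
--     return len(adj_pos)
-- ===== SOURCE B (Python) =====
-- def get_adj_num_groups(gi, gj):
--     total = 0
--     for r1, c1 in set(gi):
--         for r2, c2 in set(gj):
--             if abs(r1 - r2) + abs(c1 - c2) == 1: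
--                 total += 1
--     return total
-- ===== Notes on version B (the rewrite author's own statement) =====
-- stated objective: alternative
-- what changed: Instead of generating each cell's 4 neighbours via direction offsets and testing membership in gj (collecting 4-tuples in a set), B dedups both lists once and makes a pairwise scan over set(gi) x set(gj), counting the pairs at Manhattan distance 1 -- no direction offsets and no tuple set at all.
import Mathlib
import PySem

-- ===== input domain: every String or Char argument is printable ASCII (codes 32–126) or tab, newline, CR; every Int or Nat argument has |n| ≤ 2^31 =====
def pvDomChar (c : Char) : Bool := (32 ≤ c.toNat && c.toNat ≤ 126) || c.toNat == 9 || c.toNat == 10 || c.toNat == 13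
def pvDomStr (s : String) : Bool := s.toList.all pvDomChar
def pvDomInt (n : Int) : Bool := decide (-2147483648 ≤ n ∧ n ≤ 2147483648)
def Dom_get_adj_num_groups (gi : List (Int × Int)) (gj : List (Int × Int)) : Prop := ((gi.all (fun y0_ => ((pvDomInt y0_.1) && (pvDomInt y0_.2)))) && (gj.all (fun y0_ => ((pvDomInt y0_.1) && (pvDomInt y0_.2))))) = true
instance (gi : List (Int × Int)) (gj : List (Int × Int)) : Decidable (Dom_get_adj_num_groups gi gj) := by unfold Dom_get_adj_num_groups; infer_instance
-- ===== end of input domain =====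

-- B replaces A's per-cell direction-offset neighbour generation (set of 4-tuples) by a
-- pairwise scan over set(gi) x set(gj) counting pairs at Manhattan distance 1
-- (objective: alternative; same value, different algorithm shape).

-- ===== PORT A =====
def get_adj_num_groups (gi : List (Int × Int)) (gj : List (Int × Int)) : Int :=
  let adj_pos : PySem.Set (Int × Int × Int × Int) :=
    gi.foldl (fun adj rc =>
      [((0:Int),(1:Int)), (0,-1), (-1,0), (1,0)].foldl (fun adj d =>
        if (rc.1 + d.1, rc.2 + d.2) ∈ gj then
          PySem.Set.add adj (rc.1, rc.2, rc.1 + d.1, rc.2 + d.2)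
        else adj) adj) PySem.Set.empty
  PySem.Set.len adj_pos

-- ===== PORT B =====
def get_adj_num_groups_alt (gi : List (Int × Int)) (gj : List (Int × Int)) : Int :=
  (PySem.Set.ofList gi).foldl (fun total p =>
    (PySem.Set.ofList gj).foldl (fun total q =>
      if |p.1 - q.1| + |p.2 - q.2| = 1 then total + 1 else total) total) 0

-- ===== PRECONDITION & SPEC =====
def Spec_get_adj_num_groups (gi : List (Int × Int)) (gj : List (Int × Int)) (out : Int) : Prop := out = get_adj_num_groups_alt gi gj
instance (gi : List (Int × Int)) (gj : List (Int × Int)) (out : Int) : Decidable (Spec_get_adj_num_groups gi gj out) := by unfold Spec_get_adj_num_groups; infer_instance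

-- ===== CLAIM (what is proved, stated in full; the proofs are below) =====
def Claim_equal_get_adj_num_groups : Prop := ∀ (gi : List (Int × Int)) (gj : List (Int × Int)), Dom_get_adj_num_groups gi gj → Spec_get_adj_num_groups gi gj (get_adj_num_groups gi gj)

-- ===== LEMMAS AND PROOFS =====

def pvDirs : List (Int × Int) := [((0:Int),(1:Int)), (0,-1), (-1,0), (1,0)]

def pvTup (rc d : Int × Int) : Int × Int × Int × Int := (rc.1, rc.2, rc.1 + d.1, rc.2 + d.2)

def pvF (gj : List (Int × Int)) (rc : Int × Int) : List (Int × Int × Int × Int) :=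
  (pvDirs.filter (fun d => decide ((rc.1 + d.1, rc.2 + d.2) ∈ gj))).map (pvTup rc)

def pvAdj (p q : Int × Int) : Bool := decide (|p.1 - q.1| + |p.2 - q.2| = 1)

theorem pvTup_inj (rc : Int × Int) : Function.Injective (pvTup rc) := by
  intro d d' h
  simp [pvTup, Prod.ext_iff] at h
  exact Prod.ext (by omega) (by omega)

theorem pvF_nodup (gj : List (Int × Int)) (rc : Int × Int) : (pvF gj rc).Nodup := by
  exact List.Nodup.map (pvTup_inj rc) (List.Nodup.filter _ (by decide))

-- A as a set of tuples
theorem pvA_eq (gi gj : List (Int × Int)) :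
    get_adj_num_groups gi gj = PySem.Set.len (PySem.Set.ofList (gi.flatMap (pvF gj))) := by
  unfold get_adj_num_groups
  have h : (fun (adj : PySem.Set (Int × Int × Int × Int)) (rc : Int × Int) =>
      [((0:Int),(1:Int)), (0,-1), (-1,0), (1,0)].foldl (fun adj d =>
        if (rc.1 + d.1, rc.2 + d.2) ∈ gj then
          PySem.Set.add adj (rc.1, rc.2, rc.1 + d.1, rc.2 + d.2)
        else adj) adj)
      = (fun adj rc => (pvF gj rc).foldl PySem.Set.add adj) := by
    funext adj rc
    rw [PySem.List.foldl_ite_eq_foldl_filter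
      (p := fun d : Int × Int => (rc.1 + d.1, rc.2 + d.2) ∈ gj)
      (f := fun adj d => PySem.Set.add adj (rc.1, rc.2, rc.1 + d.1, rc.2 + d.2))]
    rw [pvF, List.foldl_map]
    rfl
  rw [h, ← List.foldl_flatMap, PySem.Set.ofList_eq_foldl]
  rfl

theorem pvLen_ofList {α : Type} [BEq α] [LawfulBEq α] [DecidableEq α] (l : List α) :
    PySem.Set.len (PySem.Set.ofList l) = (l.toFinset.card : Int) := by
  have h1 : (PySem.Set.ofList l).toFinset = l.toFinset := by
    ext x; simp [PySem.Set.mem_ofList]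
  rw [PySem.Set.len, ← List.toFinset_card_of_nodup (PySem.Set.nodup_ofList l), h1]

theorem pvA_card (gi gj : List (Int × Int)) :
    get_adj_num_groups gi gj
      = ((∑ rc ∈ gi.toFinset, (pvF gj rc).length : ℕ) : Int) := by
  rw [pvA_eq, pvLen_ofList]
  congr 1
  have hU : (gi.flatMap (pvF gj)).toFinset
      = gi.toFinset.biUnion (fun rc => (pvF gj rc).toFinset) := by
    ext t; simp [List.mem_flatMap]
  rw [hU, Finset.card_biUnion]
  · refine Finset.sum_congr rfl (fun rc _ => ?_)
    exact List.toFinset_card_of_nodup (pvF_nodup gj rc)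
  · intro a _ b _ hab
    simp only [Finset.disjoint_left]
    intro t hta htb
    simp only [List.mem_toFinset, pvF, List.mem_map] at hta htb
    obtain ⟨d, _, rfl⟩ := hta
    obtain ⟨d', _, he⟩ := htb
    exact absurd (by simpa [pvTup, Prod.ext_iff] using congrArg (fun t => (t.1, t.2.1)) he.symm) (by
      intro h; exact hab (Prod.ext h.1 h.2))

-- inner fold of B counts the adjacent q's
theorem pvInner (l : List (Int × Int)) (p : Int × Int) (t : Int) :
    l.foldl (fun total q => if |p.1 - q.1| + |p.2 - q.2| = 1 then total + 1 else total) t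
      = t + (l.countP (pvAdj p) : ℕ) := by
  induction l generalizing t with
  | nil => simp
  | cons q l ih =>
    simp only [List.foldl_cons, ih, List.countP_cons, pvAdj]
    by_cases h : |p.1 - q.1| + |p.2 - q.2| = 1 <;> simp [h] <;> ring

-- outer fold of B is a sum over the deduped gi
theorem pvOuter (l : List (Int × Int)) (g : Int × Int → ℕ) (t : Int)
    (f : Int → Int × Int → Int) (hf : ∀ t p, f t p = t + (g p : ℕ)) :
    l.foldl f t = t + ((l.map g).sum : ℕ) := by
  induction l generalizing t with
  | nil => simp
  | cons p l ih => simp [hf, ih]; ring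

theorem pvB_sum (gi gj : List (Int × Int)) :
    get_adj_num_groups_alt gi gj
      = ((∑ p ∈ gi.toFinset, (PySem.Set.ofList gj).countP (pvAdj p) : ℕ) : Int) := by
  unfold get_adj_num_groups_alt
  rw [pvOuter (PySem.Set.ofList gi) (fun p => (PySem.Set.ofList gj).countP (pvAdj p)) 0 _
    (fun t p => pvInner (PySem.Set.ofList gj) p t)]
  rw [← List.sum_toFinset _ (PySem.Set.nodup_ofList gi)]
  have : (PySem.Set.ofList gi).toFinset = gi.toFinset := by
    ext x; simp [PySem.Set.mem_ofList]
  rw [this]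
  simp

-- per-cell: number of adjacent distinct gj cells = number of directions landing in gj
theorem pvPerCell (gj : List (Int × Int)) (p : Int × Int) :
    (PySem.Set.ofList gj).countP (pvAdj p) = (pvF gj p).length := by
  rw [List.countP_eq_length_filter, pvF, List.length_map]
  have h1 : ((PySem.Set.ofList gj).filter (pvAdj p)).length
      = (gj.toFinset.filter (fun q => pvAdj p q = true)).card := by
    rw [← List.toFinset_card_of_nodup (List.Nodup.filter _ (PySem.Set.nodup_ofList gj)),
      List.toFinset_filter]
    congr 2
    ext x; simp [PySem.Set.mem_ofList]
  have h2 : (pvDirs.filter (fun d => decide ((p.1 + d.1, p.2 + d.2) ∈ gj))).length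
      = ((pvDirs.filter (fun d => decide ((p.1 + d.1, p.2 + d.2) ∈ gj))).toFinset).card := by
    rw [List.toFinset_card_of_nodup (List.Nodup.filter _ (by decide))]
  rw [h1, h2]
  refine Finset.card_bij' (fun q _ => (q.1 - p.1, q.2 - p.2)) (fun d _ => (p.1 + d.1, p.2 + d.2))
    ?_ ?_ ?_ ?_
  · intro q hq
    simp only [Finset.mem_filter, List.mem_toFinset, pvAdj, decide_eq_true_eq] at hq
    obtain ⟨hmem, habs⟩ := hq
    simp only [List.mem_toFinset, List.mem_filter, decide_eq_true_eq]
    constructor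
    · have h1 := Int.abs_eq_natAbs (p.1 - q.1)
      have h2 := Int.abs_eq_natAbs (p.2 - q.2)
      simp only [pvDirs, List.mem_cons, List.not_mem_nil, or_false, Prod.ext_iff]
      omega
    · simpa using hmem
  · intro d hd
    simp only [List.mem_toFinset, List.mem_filter, decide_eq_true_eq] at hd
    obtain ⟨hdir, hmem⟩ := hd
    simp only [Finset.mem_filter, List.mem_toFinset, pvAdj, decide_eq_true_eq]
    refine ⟨hmem, ?_⟩
    simp only [pvDirs, List.mem_cons, List.not_mem_nil, or_false, Prod.ext_iff] at hdir
    have h1 := Int.abs_eq_natAbs (p.1 - (p.1 + d.1))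
    have h2 := Int.abs_eq_natAbs (p.2 - (p.2 + d.2))
    omega
  · intro q _; simp
  · intro d _; simp

theorem get_adj_num_groups_eq_alt (gi gj : List (Int × Int)) :
    get_adj_num_groups gi gj = get_adj_num_groups_alt gi gj := by
  rw [pvA_card, pvB_sum]
  have h : (∑ rc ∈ gi.toFinset, (pvF gj rc).length)
      = ∑ p ∈ gi.toFinset, (PySem.Set.ofList gj).countP (pvAdj p) :=
    Finset.sum_congr rfl (fun p _ => (pvPerCell gj p).symm)
  rw [h]

-- ===== VERDICT (by name: the statement is the Claim_ definition above) =====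
theorem get_adj_num_groups_spec : Claim_equal_get_adj_num_groups := by
  intro gi gj _
  exact get_adj_num_groups_eq_alt gi gj
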